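-- pv_equiv track=rewrite | github.com/rcbellamy/ParallelRegression | ParallelRegression/__init__.py | masked_split
-- ===== SOURCE A (Python) =====
-- def masked_split( string, mask, split ):
--     '''Splits `string` based on the location(s) at which `split` is located in
--     `mask`.  Compare to str.split( ).
--
--     Parameters
--     ----------
--     string : string
--         The unmasked string from which content is to be recovered.
--     mask : string
--         The masked version of `string` to be used to determine the the
--         location(s) at which to split `string`.
--     split : string
--         The string identifying the location(s) at which to split `string`.
--
--     Returns
--     -------
--     list
--         List of substrings resulting from splitting `string` based on the
--         presence of `split` in `mask`.
--     '''
--     mask = mask.split( split )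
--     ret = list( )
--     a = 0
--     for m in mask:
--         t = a + len( m )
--         ret.append( string[a:t] )
--         a = t + len( split )
--     return( ret )
-- ===== SOURCE B (Python) =====
-- def masked_split(string, mask, split):
--     # One pass over mask with str.find instead of materialising mask.split():
--     # each found index is directly a cut position into string.
--     if not split:
--         raise ValueError('empty separator')  # same contract as str.split('')
--     ret = []
--     prev = 0
--     i = mask.find(split)
--     while i >= 0:
--         ret.append(string[prev:i])
--         prev = i + len(split)
--         i = mask.find(split, prev)
--     ret.append(string[prev:len(mask)])
--     return ret
-- ===== Notes on version B (the rewrite author's own statement) =====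
-- stated objective: alternative
-- what changed: B drops mask.split() and the running-offset bookkeeping entirely: a single str.find scan over mask yields each delimiter's index, which is used directly as a cut position into string.
import Mathlib
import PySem

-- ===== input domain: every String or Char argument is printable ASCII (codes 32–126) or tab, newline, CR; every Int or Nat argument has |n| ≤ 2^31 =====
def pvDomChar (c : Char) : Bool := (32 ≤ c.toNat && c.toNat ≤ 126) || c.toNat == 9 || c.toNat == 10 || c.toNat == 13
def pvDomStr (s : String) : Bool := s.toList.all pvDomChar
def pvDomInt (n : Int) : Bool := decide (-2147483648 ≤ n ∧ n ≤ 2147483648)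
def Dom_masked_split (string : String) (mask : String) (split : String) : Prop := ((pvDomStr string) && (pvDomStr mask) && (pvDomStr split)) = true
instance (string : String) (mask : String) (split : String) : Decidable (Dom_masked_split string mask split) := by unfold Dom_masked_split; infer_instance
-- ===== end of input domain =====

-- B replaces mask.split + running-offset slicing by a single str.find scan over mask whose
-- hit indices are used directly as cut positions into string (objective: alternative decomposition).

-- ===== PORT A =====
-- A: mask.split(split), then for each segment slice string[a:t] with a running offset.
def masked_split (string : String) (mask : String) (split : String) : List String :=
  match PySem.Chars.split? mask.toList split.toList with
  | none => []  -- mask.split('') raises ValueError; excluded by Pre_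
  | some parts =>
      ((parts.foldl
          (fun (st : List (List Char) × Int) m =>
            let t := st.2 + (m.length : Int)
            (st.1 ++ [PySem.List.slice string.toList (some st.2) (some t)], t + (split.toList.length : Int)))
          ([], 0)).1).map String.mk

-- ===== PORT B =====
-- B's while-loop: fuel makes the loop total; with split ≠ '' each step advances prev, so
-- fuel = mask.length + 1 is never exhausted (the fuel-0 row repeats the exit row).
def maskedSplitAltGo (s m sep : List Char) : Nat → Nat → List (List Char) → List (List Char)
  | 0, prev, out => out ++ [PySem.List.slice s (some (prev : Int)) (some (m.length : Int))]
  | fuel + 1, prev, out =>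
      let i := PySem.Chars.findFrom m sep (prev : Int)
      if i < 0 then out ++ [PySem.List.slice s (some (prev : Int)) (some (m.length : Int))]
      else maskedSplitAltGo s m sep fuel (i.toNat + sep.length)
             (out ++ [PySem.List.slice s (some (prev : Int)) (some i)])

def masked_split_alt (string : String) (mask : String) (split : String) : List String :=
  if split = "" then []  -- B raises ValueError here (outside Pre_)
  else (maskedSplitAltGo string.toList mask.toList split.toList
          (mask.toList.length + 1) 0 []).map String.mk

-- ===== PRECONDITION & SPEC =====
-- Pre_ excludes only split = "", on which Python A raises ValueError (str.split('')).
def Pre_masked_split (string : String) (mask : String) (split : String) : Prop := split ≠ ""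
instance (string : String) (mask : String) (split : String) : Decidable (Pre_masked_split string mask split) := by unfold Pre_masked_split; infer_instance

def pvWitness_masked_split : String × String × String := ("hello world", "aaaaa;world", ";")

def Spec_masked_split (string : String) (mask : String) (split : String) (out : List String) : Prop := out = masked_split_alt string mask split
instance (string : String) (mask : String) (split : String) (out : List String) : Decidable (Spec_masked_split string mask split out) := by unfold Spec_masked_split; infer_instance

-- ===== CLAIM (what is proved, stated in full; the proofs are below) =====
def Claim_equal_masked_split : Prop := ∀ (string : String) (mask : String) (split : String), Dom_masked_split string mask split → Pre_masked_split string mask split → Spec_masked_split string mask split (masked_split string mask split)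

-- ===== LEMMAS AND PROOFS =====

theorem go_zero (sep l cur acc) : PySem.Chars.splitOn.go sep 0 l cur acc = ((cur.reverse ++ l) :: acc).reverse := by
  simp [PySem.Chars.splitOn.go]

theorem go_nil (sep : List Char) (fuel) (cur acc) : PySem.Chars.splitOn.go sep (fuel+1) [] cur acc = (cur.reverse :: acc).reverse := by
  simp [PySem.Chars.splitOn.go]

theorem go_cons (sep : List Char) (fuel) (c : Char) (rest cur acc) :
    PySem.Chars.splitOn.go sep (fuel+1) (c :: rest) cur acc =
      if sep.isPrefixOf (c :: rest) then PySem.Chars.splitOn.go sep fuel (List.drop sep.length (c :: rest)) [] (cur.reverse :: acc)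
      else PySem.Chars.splitOn.go sep fuel rest (c :: cur) acc := by
  rw [PySem.Chars.splitOn.go]

-- prepend x to the first piece
def phead (x : List Char) : List (List Char) → List (List Char)
  | [] => [x]
  | h :: t => (x ++ h) :: t

theorem phead_phead (x y : List Char) (z) : phead x (phead y z) = phead (x ++ y) z := by
  cases z <;> simp [phead]

theorem go_acc (sep : List Char) (fuel : Nat) : ∀ l cur acc, PySem.Chars.splitOn.go sep fuel l cur acc = acc.reverse ++ PySem.Chars.splitOn.go sep fuel l cur [] := by
  induction fuel with
  | zero => intro l cur acc; simp [go_zero]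
  | succ n ih =>
    intro l cur acc
    cases l with
    | nil => simp [go_nil]
    | cons c rest =>
      rw [go_cons, go_cons]
      split
      · rw [ih _ [] (cur.reverse :: acc), ih _ [] ([cur.reverse])]; simp
      · rw [ih rest (c :: cur) acc]

theorem go_cur (sep : List Char) (fuel : Nat) : ∀ l cur, PySem.Chars.splitOn.go sep fuel l cur [] = phead cur.reverse (PySem.Chars.splitOn.go sep fuel l [] []) := by
  induction fuel with
  | zero => intro l cur; simp [go_zero, phead]
  | succ n ih =>
    intro l cur
    cases l with
    | nil => simp [go_nil, phead]
    | cons c rest =>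
      rw [go_cons, go_cons]
      split
      · rw [go_acc sep n _ [] [cur.reverse]]
        conv_rhs => rw [go_acc sep n _ [] [[].reverse]]
        simp [phead]
      · rw [ih rest (c :: cur), ih rest [c], phead_phead]
        simp

theorem go_fuel (sep : List Char) (hsep : sep ≠ []) (f1 : Nat) : ∀ f2 l cur acc, l.length < f1 → l.length < f2 →
    PySem.Chars.splitOn.go sep f1 l cur acc = PySem.Chars.splitOn.go sep f2 l cur acc := by
  induction f1 with
  | zero => intro f2 l cur acc h1 _; omega
  | succ n ih =>
    intro f2 l cur acc h1 h2
    cases l with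
    | nil =>
      cases f2 with
      | zero => omega
      | succ m => rw [go_nil, go_nil]
    | cons c rest =>
      cases f2 with
      | zero => simp at h2
      | succ m =>
        rw [go_cons, go_cons]
        split
        · rename_i hp
          have hlen : 0 < sep.length := List.length_pos_iff.mpr hsep
          have hle : sep.length ≤ (c :: rest).length := (List.IsPrefix.length_le (List.isPrefixOf_iff_prefix.mp hp))
          simp only [List.length_cons] at hle h1 h2
          apply ih
          · simp only [List.length_drop, List.length_cons]; omega
          · simp only [List.length_drop, List.length_cons]; omega
        · apply ih <;> simp at h1 h2 ⊢ <;> omega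

theorem find_eq_of (l sub : List Char) (k : Nat) (hpre : sub <+: l.drop k)
    (hmin : ∀ i < k, ¬ sub <+: l.drop i) : PySem.Chars.find l sub = (k : Int) := by
  have hinf : sub <:+: l := hpre.isInfix.trans (List.drop_suffix k l).isInfix
  have hnn : 0 ≤ PySem.Chars.find l sub := (PySem.Chars.find_nonneg_iff l sub).mpr hinf
  obtain ⟨h1, h2⟩ := PySem.Chars.find_spec hnn
  rcases lt_trichotomy (PySem.Chars.find l sub).toNat k with h | h | h
  · exact absurd h1 (hmin _ h)
  · omega
  · exact absurd hpre (h2 k h)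

theorem find_of_prefix (l sub : List Char) (h : sub.isPrefixOf l) : PySem.Chars.find l sub = 0 := by
  apply find_eq_of l sub 0
  · simpa using List.isPrefixOf_iff_prefix.mp h
  · intro i hi; omega

theorem find_cons_shift (c : Char) (rest sub : List Char) (h : ¬ sub.isPrefixOf (c :: rest)) :
    PySem.Chars.find (c :: rest) sub =
      if PySem.Chars.find rest sub = -1 then -1 else PySem.Chars.find rest sub + 1 := by
  have hnp : ¬ sub <+: (c :: rest) := fun hp => h (List.isPrefixOf_iff_prefix.mpr hp)
  split
  · rename_i hm
    rw [PySem.Chars.find_eq_neg_one_iff] at hm ⊢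
    intro hinf
    have hIn : PySem.Chars.isIn sub (c :: rest) = true := (PySem.Chars.isIn_iff_infix sub (c :: rest)).mpr hinf
    obtain ⟨j, hj⟩ := (PySem.Chars.exists_prefix_drop_iff_isIn sub (c :: rest)).mpr hIn
    cases j with
    | zero => exact hnp (by simpa using hj)
    | succ k =>
      exact hm (List.IsInfix.trans (List.IsPrefix.isInfix (by simpa using hj)) (List.drop_suffix k rest).isInfix)
  · rename_i hm
    have hnn : 0 ≤ PySem.Chars.find rest sub := by
      have := PySem.Chars.neg_one_le_find rest sub; omega
    obtain ⟨h1, h2⟩ := PySem.Chars.find_spec hnn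
    have := find_eq_of (c :: rest) sub ((PySem.Chars.find rest sub).toNat + 1)
      (by simpa using h1)
      (by
        intro i hi
        cases i with
        | zero => simpa using hnp
        | succ j => intro hp; exact h2 j (by omega) (by simpa using hp))
    omega

theorem infix_nil_of_ne (sub : List Char) (h : sub ≠ []) : ¬ sub <:+: ([] : List Char) := by
  intro hc; exact h (List.eq_nil_of_infix_nil hc)

theorem go_find (sep : List Char) (hsep : sep ≠ []) : ∀ fuel l, l.length < fuel →
    PySem.Chars.splitOn.go sep fuel l [] [] =
      (if PySem.Chars.find l sep = -1 then [l]
       else l.take (PySem.Chars.find l sep).toNat ::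
         PySem.Chars.splitOn.go sep
           ((l.drop ((PySem.Chars.find l sep).toNat + sep.length)).length + 1)
           (l.drop ((PySem.Chars.find l sep).toNat + sep.length)) [] []) := by
  have hL : 0 < sep.length := List.length_pos_iff.mpr hsep
  intro fuel
  induction fuel with
  | zero => intro l h; omega
  | succ n ih =>
    intro l hlen
    cases l with
    | nil =>
      rw [go_nil]
      rw [if_pos ((PySem.Chars.find_eq_neg_one_iff _ _).mpr (infix_nil_of_ne sep hsep))]
      simp
    | cons c rest =>
      rw [go_cons]
      by_cases hp : sep.isPrefixOf (c :: rest)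
      · rw [if_pos hp]
        rw [go_acc sep n _ [] [[].reverse]]
        have hfind := find_of_prefix _ _ hp
        rw [hfind]
        rw [if_neg (by omega)]
        have hle : sep.length ≤ (c :: rest).length :=
          List.IsPrefix.length_le (List.isPrefixOf_iff_prefix.mp hp)
        simp only [List.length_cons] at hle hlen
        rw [go_fuel sep hsep n ((List.drop sep.length (c :: rest)).length + 1)
          (List.drop sep.length (c :: rest)) [] []
          (by simp only [List.length_drop, List.length_cons]; omega)
          (by omega)]
        simp
      · rw [if_neg hp]
        rw [go_cur sep n rest [c]]
        rw [ih rest (by simp at hlen; omega)]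
        rw [find_cons_shift c rest sep hp]
        by_cases hm : PySem.Chars.find rest sep = -1
        · simp [hm, phead]
        · have hnn : 0 ≤ PySem.Chars.find rest sep := by
            have := PySem.Chars.neg_one_le_find rest sep; omega
          rw [if_neg hm, if_neg hm, if_neg (by omega)]
          have htn : (PySem.Chars.find rest sep + 1).toNat = (PySem.Chars.find rest sep).toNat + 1 := by omega
          rw [htn]
          simp only [List.take_succ_cons, phead]
          simp only [List.cons.injEq]
          have hsh : (PySem.Chars.find rest sep).toNat + 1 + sep.length = ((PySem.Chars.find rest sep).toNat + sep.length) + 1 := by omega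
          rw [hsh, List.drop_succ_cons]
          exact ⟨rfl, rfl⟩

theorem splitOn_rec (m sep : List Char) (hsep : sep ≠ []) :
    PySem.Chars.splitOn m sep =
      (if PySem.Chars.find m sep = -1 then [m]
       else m.take (PySem.Chars.find m sep).toNat ::
         PySem.Chars.splitOn (m.drop ((PySem.Chars.find m sep).toNat + sep.length)) sep) := by
  show PySem.Chars.splitOn.go sep (m.length + 1) m [] [] = _
  rw [go_find sep hsep (m.length + 1) m (by omega)]
  rfl

theorem grand (s m sep : List Char) (hsep : sep ≠ []) :
    ∀ (fuel k : Nat) (out : List (List Char)), k ≤ m.length → m.length < fuel + k →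
      ((PySem.Chars.splitOn (m.drop k) sep).foldl
          (fun (st : List (List Char) × Int) seg =>
            let t := st.2 + (seg.length : Int)
            (st.1 ++ [PySem.List.slice s (some st.2) (some t)], t + (sep.length : Int)))
          (out, (k : Int))).1
        = maskedSplitAltGo s m sep fuel k out := by
  have hL : 0 < sep.length := List.length_pos_iff.mpr hsep
  intro fuel
  induction fuel with
  | zero => intro k out hk hf; omega
  | succ n ih =>
    intro k out hk hf
    rw [splitOn_rec _ sep hsep]
    rw [maskedSplitAltGo]
    rw [PySem.Chars.findFrom_natCast m sep k hk]
    by_cases hm : PySem.Chars.find (m.drop k) sep = -1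
    · rw [if_pos hm, if_pos (by rw [if_pos hm]; norm_num)]
      simp only [List.foldl_cons, List.foldl_nil]
      have : ((k : Int) + ((m.drop k).length : Int)) = (m.length : Int) := by
        simp only [List.length_drop]; omega
      rw [this]
    · have hnn : 0 ≤ PySem.Chars.find (m.drop k) sep := by
        have := PySem.Chars.neg_one_le_find (m.drop k) sep; omega
      set j := PySem.Chars.find (m.drop k) sep with hj
      obtain ⟨hpre, _⟩ := PySem.Chars.find_spec (s := m.drop k) (sub := sep) hnn
      have hjlen : j ≤ ((m.drop k).length : Int) := PySem.Chars.find_le_length _ _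
      have hocc : j.toNat + sep.length ≤ m.length - k := by
        have := List.IsPrefix.length_le hpre
        simp only [List.length_drop] at this ⊢
        omega
      rw [if_neg hm, if_neg (by rw [if_neg hm]; omega)]
      simp only [List.foldl_cons]
      have htake : ((m.drop k).take j.toNat).length = j.toNat := by
        simp only [List.length_take, List.length_drop]; omega
      rw [htake]
      rw [List.drop_drop]
      have hk' : k + (j.toNat + sep.length) ≤ m.length := by omega
      have hstate : ((k : Int) + (j.toNat : Int)) + (sep.length : Int) = ((k + (j.toNat + sep.length) : Nat) : Int) := by push_cast; ring
      have hslice : PySem.List.slice s (some (k : Int)) (some ((k : Int) + (j.toNat : Int))) = PySem.List.slice s (some ((k : Nat) : Int)) (some ((k : Int) + j)) := by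
        rw [Int.toNat_of_nonneg hnn]
      rw [if_neg hm]
      rw [← hslice]
      have hidx : ((k : Int) + j).toNat + sep.length = k + (j.toNat + sep.length) := by omega
      rw [hidx, hstate]
      exact ih _ _ hk' (by omega)

-- ===== VERDICT (by name: the statement is the Claim_ definition above) =====
theorem masked_split_spec : Claim_equal_masked_split := by
  intro string mask split _ hpre
  unfold Spec_masked_split masked_split masked_split_alt
  have hne : split.toList ≠ [] := by
    intro h
    exact hpre (by
      have := congrArg String.ofList h
      simpa using this)
  rw [if_neg hpre]
  have hemp : (split.toList.isEmpty) = false := by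
    simpa [List.isEmpty_iff] using hne
  simp only [PySem.Chars.split?, hemp, Bool.false_eq_true, if_false]
  congr 1
  have := grand string.toList mask.toList split.toList hne (mask.toList.length + 1) 0 [] (by omega) (by omega)
  simpa using this
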